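-- pv_equiv track=rewrite | github.com/YurenHao0426/PaperFetcher | scripts/fetch_papers.py | _find_papers_insert_position
-- ===== SOURCE A (Python) =====
-- def _find_papers_insert_position(content: str) -> int:
--     """Find the best position to insert new papers (after main doc, before existing papers)."""
--     lines = content.split('\n')
--
--     # Look for patterns that indicate the end of documentation and start of papers
--     # Search in order of priority
--     insert_patterns = [
--         "**Note**: This tool is designed for academic research purposes",  # End of README
--         "## Papers Updated on",  # Existing paper sections
--         "## Historical",  # Historical paper sections
--         "### ",  # Any section that might be a paper title
--         "---",  # Common separator before papers
--     ]
--
--     for pattern in insert_patterns: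
--         for i, line in enumerate(lines):
--             if pattern in line:
--                 # Found a good insertion point - insert before this line
--                 # Convert line index to character position
--                 char_position = sum(len(lines[j]) + 1 for j in range(i))  # +1 for newline
--                 return char_position
--
--     # If no patterns found, try to find end of main documentation
--     # Look for the end of the last documentation section
--     last_doc_section = -1
--     for i, line in enumerate(lines):
--         if line.startswith('## ') and not line.startswith('## Papers') and not line.startswith('## Historical'):
--             last_doc_section = i
--
--     if last_doc_section >= 0:
--         # Find the end of this documentation section
--         section_end = len(lines)
--         for i in range(last_doc_section + 1, len(lines)):
--             if lines[i].startswith('## '):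
--                 section_end = i
--                 break
--
--         # Insert after this section
--         char_position = sum(len(lines[j]) + 1 for j in range(section_end))
--         return char_position
--
--     # Final fallback: return 0 to trigger append behavior
--     return 0
-- ===== SOURCE B (Python) =====
-- def _find_papers_insert_position(content: str) -> int:
--     """Find the best position to insert new papers (after main doc, before existing papers)."""
--     insert_patterns = [
--         "**Note**: This tool is designed for academic research purposes",
--         "## Papers Updated on",
--         "## Historical",
--         "### ",
--         "---",
--     ]
--     # One pass over the lines: record the first-match offset of every pattern,
--     # and track the fallback section boundaries incrementally.
--     firsts = {}
--     seen_doc = False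
--     section_end = None
--     offset = 0
--     for line in content.split('\n'):
--         for p in insert_patterns:
--             if p not in firsts and p in line:
--                 firsts[p] = offset
--         if line.startswith('## '):
--             if line.startswith('## Papers') or line.startswith('## Historical'):
--                 if seen_doc and section_end is None:
--                     section_end = offset
--             else:
--                 seen_doc = True
--                 section_end = None
--         offset += len(line) + 1
--     for p in insert_patterns:
--         if p in firsts:
--             return firsts[p]
--     if seen_doc:
--         return section_end if section_end is not None else offset
--     return 0
-- ===== Notes on version B (the rewrite author's own statement) =====
-- stated objective: alternative
-- what changed: Replaces A's pattern-outer nested scans (re-enumerating all lines per pattern, plus per-hit prefix-sum recomputation and two extra fallback passes) with a single pass over the lines that maintains a running character offset and records, in one dict, the first-match offset of every pattern together with the fallback section boundaries; priority is applied afterwards by one lookup per pattern.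
import Mathlib
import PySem

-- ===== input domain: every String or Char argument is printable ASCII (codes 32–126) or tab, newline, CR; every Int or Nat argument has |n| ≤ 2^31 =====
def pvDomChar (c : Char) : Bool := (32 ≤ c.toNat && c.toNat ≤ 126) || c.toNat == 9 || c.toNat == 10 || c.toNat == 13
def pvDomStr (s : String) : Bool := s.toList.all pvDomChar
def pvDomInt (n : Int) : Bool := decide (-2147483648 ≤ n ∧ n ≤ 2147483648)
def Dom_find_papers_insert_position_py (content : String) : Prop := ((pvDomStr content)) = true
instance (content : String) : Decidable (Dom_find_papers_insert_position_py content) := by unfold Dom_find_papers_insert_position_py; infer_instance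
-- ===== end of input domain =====

-- B replaces A's pattern-outer nested scans (plus per-hit prefix-sum recomputation and
-- separate fallback passes) by a single pass over the lines carrying a running character
-- offset, a dict of first-match offsets per pattern, and the fallback section boundaries;
-- objective: alternative (same asymptotic cost, one traversal instead of up to seven).


-- ===== PORT A =====
-- the five insert_patterns, in priority order
def pvPatterns : List (List Char) :=
  ["**Note**: This tool is designed for academic research purposes".toList,
   "## Papers Updated on".toList,
   "## Historical".toList,
   "### ".toList,
   "---".toList]

-- char_position = sum(len(lines[j]) + 1 for j in range(i))
def pvCharPos (lines : List (List Char)) (i : Int) : Int :=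
  ((PySem.List.pyRange 0 i).map (fun j => PySem.Chars.len (PySem.List.pyGetD lines j []) + 1)).sum

-- for i, line in enumerate(lines): if pattern in line: return char_position
def pvScanLines (pattern : List Char) (lines : List (List Char)) :
    List (Int × List Char) → Option Int
  | [] => none
  | (i, line) :: rest =>
      if PySem.Chars.isIn pattern line then some (pvCharPos lines i)
      else pvScanLines pattern lines rest

-- for pattern in insert_patterns: …
def pvTryPatterns (lines : List (List Char)) : List (List Char) → Option Int
  | [] => none
  | p :: ps =>
      match pvScanLines p lines (PySem.List.enumerate lines 0) with
      | some v => some v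
      | none => pvTryPatterns lines ps

-- line.startswith('## ') and not line.startswith('## Papers') and not line.startswith('## Historical')
def pvIsDocA (line : List Char) : Bool :=
  PySem.Chars.startswith line "## ".toList &&
  !PySem.Chars.startswith line "## Papers".toList &&
  !PySem.Chars.startswith line "## Historical".toList

-- the last_doc_section loop
def pvLastDoc : List (Int × List Char) → Int → Int
  | [], acc => acc
  | (i, line) :: rest, acc => pvLastDoc rest (if pvIsDocA line then i else acc)

-- for i in range(last_doc_section + 1, len(lines)): if lines[i].startswith('## '): section_end = i; break
def pvSecLoop (lines : List (List Char)) : List Int → Int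
  | [] => (lines.length : Int)
  | i :: rest =>
      if PySem.Chars.startswith (PySem.List.pyGetD lines i []) "## ".toList then i
      else pvSecLoop lines rest

def find_papers_insert_position_py (content : String) : Int :=
  let lines := PySem.Chars.splitOn content.toList "\n".toList
  match pvTryPatterns lines pvPatterns with
  | some v => v
  | none =>
      let last := pvLastDoc (PySem.List.enumerate lines 0) (-1)
      if 0 ≤ last then
        pvCharPos lines (pvSecLoop lines (PySem.List.pyRange (last + 1) lines.length))
      else 0

-- ===== PORT B =====
def pvPatternsB : List (List Char) :=
  ["**Note**: This tool is designed for academic research purposes".toList,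
   "## Papers Updated on".toList,
   "## Historical".toList,
   "### ".toList,
   "---".toList]

-- one iteration of B's single pass: state = (firsts, seen_doc, section_end, offset)
def pvStep (st : PySem.Dict (List Char) Int × Bool × Option Int × Int) (line : List Char) :
    PySem.Dict (List Char) Int × Bool × Option Int × Int :=
  match st with
  | (d, seenDoc, secEnd, off) =>
    let d := pvPatternsB.foldl
      (fun d p => if !PySem.Dict.contains d p && PySem.Chars.isIn p line
                  then PySem.Dict.insert d p off else d) d
    let (seenDoc, secEnd) :=
      if PySem.Chars.startswith line "## ".toList then
        if PySem.Chars.startswith line "## Papers".toList ||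
           PySem.Chars.startswith line "## Historical".toList then
          (seenDoc, if seenDoc && secEnd.isNone then some off else secEnd)
        else (true, (none : Option Int))
      else (seenDoc, secEnd)
    (d, seenDoc, secEnd, off + PySem.Chars.len line + 1)

-- for p in insert_patterns: if p in firsts: return firsts[p]
def pvSelect (d : PySem.Dict (List Char) Int) : List (List Char) → Option Int
  | [] => none
  | p :: ps =>
      match PySem.Dict.get? d p with
      | some v => some v
      | none => pvSelect d ps

def find_papers_insert_position_py_alt (content : String) : Int :=
  let lines := PySem.Chars.splitOn content.toList "\n".toList
  let st := lines.foldl pvStep (PySem.Dict.empty, false, none, 0)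
  match pvSelect st.1 pvPatternsB with
  | some v => v
  | none => if st.2.1 then st.2.2.1.getD st.2.2.2 else 0

-- ===== PRECONDITION & SPEC =====
def Spec_find_papers_insert_position_py (content : String) (out : Int) : Prop := out = find_papers_insert_position_py_alt content
instance (content : String) (out : Int) : Decidable (Spec_find_papers_insert_position_py content out) := by unfold Spec_find_papers_insert_position_py; infer_instance

-- ===== CLAIM (what is proved, stated in full; the proofs are below) =====
def Claim_equal_find_papers_insert_position_py : Prop := ∀ (content : String), Dom_find_papers_insert_position_py content → Spec_find_papers_insert_position_py content (find_papers_insert_position_py content)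

-- ===== LEMMAS AND PROOFS =====

-- spec-side vocabulary (proof helpers only)
def pvIsPH (l : List Char) : Bool :=
  PySem.Chars.startswith l "## Papers".toList || PySem.Chars.startswith l "## Historical".toList

def pvIsHH (l : List Char) : Bool := PySem.Chars.startswith l "## ".toList

def pvLineStart (lines : List (List Char)) (i : Nat) : Int :=
  ((lines.take i).map (fun l => PySem.Chars.len l + 1)).sum

def pvTotLen (lines : List (List Char)) : Int :=
  (lines.map (fun l => PySem.Chars.len l + 1)).sum

-- index of the last documentation-section line
def pvLastDoc? : List (List Char) → Option Nat
  | [] => none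
  | l :: rest =>
      match pvLastDoc? rest with
      | some i => some (i + 1)
      | none => if pvIsDocA l then some 0 else none

-- common answer of the pattern-priority phase
def pvPatAns (lines : List (List Char)) : List (List Char) → Option Int
  | [] => none
  | p :: ps =>
      match lines.findIdx? (fun l => PySem.Chars.isIn p l) with
      | some i => some (pvLineStart lines i)
      | none => pvPatAns lines ps

theorem pv_charPos_key (lines : List (List Char)) (m : Nat) :
    pvCharPos lines (m : Int) =
      ((List.range m).map (fun k => PySem.Chars.len (lines.getD k []) + 1)).sum := by
  rw [pvCharPos, PySem.List.pyRange_zero_natCast, List.map_map]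
  congr 1
  exact List.map_congr_left (fun k _ => by simp [Function.comp, PySem.List.pyGetD_natCast])

theorem pv_charPos_eq (lines : List (List Char)) (i : Nat) (h : i ≤ lines.length) :
    pvCharPos lines (i : Int) = pvLineStart lines i := by
  induction i with
  | zero => rw [pv_charPos_key]; simp [pvLineStart]
  | succ n ih =>
    have h1 : n < lines.length := Nat.lt_of_succ_le h
    have e2 : lines.take (n + 1) = lines.take n ++ [lines[n]] := by
      rw [List.take_succ, List.getElem?_eq_getElem h1]
      rfl
    rw [pv_charPos_key, List.range_succ, List.map_append, List.sum_append, ← pv_charPos_key,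
      ih (le_of_lt h1), pvLineStart, pvLineStart, e2, List.map_append, List.sum_append]
    simp [List.getD_eq_getElem, h1]

theorem pv_scan_eq (p : List Char) (full lines : List (List Char)) (s : Nat) :
    pvScanLines p full (PySem.List.enumerate lines (s : Int)) =
      (lines.findIdx? (fun l => PySem.Chars.isIn p l)).map
        (fun k => pvCharPos full ((s + k : Nat) : Int)) := by
  induction lines generalizing s with
  | nil => simp [pvScanLines, PySem.List.enumerate_nil]
  | cons l rest ih =>
    rw [PySem.List.enumerate_cons, List.findIdx?_cons]
    by_cases hc : PySem.Chars.isIn p l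
    · simp [pvScanLines, hc]
    · have hrw : ((s : Int) + 1) = ((s + 1 : Nat) : Int) := by push_cast; ring
      simp only [pvScanLines, hc, if_neg, Bool.false_eq_true, if_false, hrw, ih (s + 1)]
      cases hfi : rest.findIdx? (fun l => PySem.Chars.isIn p l) with
      | none => simp
      | some k =>
        simp only [Option.map_some, Option.map_map]
        congr 1
        have : s + 1 + k = s + (k + 1) := by omega
        simp [this]

theorem pv_try_eq (lines : List (List Char)) (pats : List (List Char)) :
    pvTryPatterns lines pats = pvPatAns lines pats := by
  induction pats with
  | nil => rfl
  | cons q ps ih =>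
    have hs := pv_scan_eq q lines lines 0
    simp only [Nat.cast_zero, Nat.zero_add, zero_add] at hs
    rw [pvTryPatterns, pvPatAns, hs]
    cases hfi : lines.findIdx? (fun l => PySem.Chars.isIn q l) with
    | none => simpa using ih
    | some k =>
      have hk : k < lines.length := by
        obtain ⟨hl, -, -⟩ := List.findIdx?_eq_some_iff_getElem.mp hfi
        exact hl
      simp [pv_charPos_eq lines k (le_of_lt hk)]


theorem pv_lineStart_zero (lines : List (List Char)) : pvLineStart lines 0 = 0 := by
  simp [pvLineStart]

theorem pv_lineStart_cons (l : List Char) (rest : List (List Char)) (i : Nat) :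
    pvLineStart (l :: rest) (i + 1) = PySem.Chars.len l + 1 + pvLineStart rest i := by
  simp [pvLineStart, List.take_succ_cons]

theorem pv_step_d (st : PySem.Dict (List Char) Int × Bool × Option Int × Int) (l : List Char) :
    (pvStep st l).1 = pvPatternsB.foldl
      (fun d p => if !PySem.Dict.contains d p && PySem.Chars.isIn p l
                  then PySem.Dict.insert d p st.2.2.2 else d) st.1 := by
  obtain ⟨d, b, s, o⟩ := st
  simp only [pvStep]

theorem pv_step_off (st : PySem.Dict (List Char) Int × Bool × Option Int × Int) (l : List Char) :
    (pvStep st l).2.2.2 = st.2.2.2 + PySem.Chars.len l + 1 := by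
  obtain ⟨d, b, s, o⟩ := st
  simp only [pvStep]

theorem pv_ph_implies_hh (l : List Char) (h : pvIsPH l = true) :
    PySem.Chars.startswith l "## ".toList = true := by
  rw [PySem.Chars.startswith_iff]
  rcases Bool.or_eq_true_iff.mp h with h' | h' <;>
    exact ((by decide : ("## ".toList <+: _)).trans ((PySem.Chars.startswith_iff _ _).mp h'))

theorem pv_step_seen (st : PySem.Dict (List Char) Int × Bool × Option Int × Int) (l : List Char) :
    (pvStep st l).2.1 = (st.2.1 || pvIsDocA l) := by
  obtain ⟨d, b, s, o⟩ := st
  by_cases h1 : PySem.Chars.startswith l "## ".toList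
  · by_cases h2 : pvIsPH l
    · have hdoc : pvIsDocA l = false := by
        rcases Bool.or_eq_true_iff.mp h2 with h' | h' <;> simp at h' <;> simp [pvIsDocA, h']
      have h2' := h2
      simp only [pvIsPH] at h2'
      simp at h1 h2'
      simp [pvStep, h1, h2', hdoc]
    · have h2' : (PySem.Chars.startswith l "## Papers".toList ||
          PySem.Chars.startswith l "## Historical".toList) = false := by
        simpa [pvIsPH] using h2
      simp only [Bool.or_eq_false_iff] at h2'
      simp at h1 h2'
      have hdoc : pvIsDocA l = true := by
        simp [pvIsDocA]
        exact ⟨⟨h1, h2'.1⟩, h2'.2⟩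
      simp [pvStep, h1, h2', hdoc]
  · simp at h1
    have hdoc : pvIsDocA l = false := by simp [pvIsDocA, h1]
    simp [pvStep, h1, hdoc]

theorem pv_step_sec (st : PySem.Dict (List Char) Int × Bool × Option Int × Int) (l : List Char) :
    (pvStep st l).2.2.1 =
      if pvIsDocA l then none
      else if pvIsPH l then (if st.2.1 && st.2.2.1.isNone then some st.2.2.2 else st.2.2.1)
      else st.2.2.1 := by
  obtain ⟨d, b, s, o⟩ := st
  by_cases h2 : pvIsPH l
  · have h1 : PySem.Chars.startswith l "## ".toList = true := pv_ph_implies_hh l h2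
    have hdoc : pvIsDocA l = false := by
      rcases Bool.or_eq_true_iff.mp h2 with h' | h' <;> simp at h' <;> simp [pvIsDocA, h']
    have h2' := h2
    simp only [pvIsPH] at h2'
    simp at h1 h2'
    simp [pvStep, h1, h2', hdoc, h2]
  · have h2' : (PySem.Chars.startswith l "## Papers".toList ||
        PySem.Chars.startswith l "## Historical".toList) = false := by
      simpa [pvIsPH] using h2
    by_cases h1 : PySem.Chars.startswith l "## ".toList
    · simp only [Bool.or_eq_false_iff] at h2'
      simp at h1 h2'
      have hdoc : pvIsDocA l = true := by
        simp [pvIsDocA]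
        exact ⟨⟨h1, h2'.1⟩, h2'.2⟩
      simp [pvStep, h1, h2', hdoc, h2]
    · simp at h1 h2'
      have hdoc : pvIsDocA l = false := by simp [pvIsDocA, h1]
      simp [pvStep, h1, h2', hdoc, h2]

theorem pv_step_eta (st : PySem.Dict (List Char) Int × Bool × Option Int × Int) (l : List Char) :
    pvStep st l = ((pvStep st l).1, (pvStep st l).2.1, (pvStep st l).2.2.1, (pvStep st l).2.2.2) := rfl

theorem pv_inner_get? (pats : List (List Char)) (d : PySem.Dict (List Char) Int)
    (line : List Char) (off : Int) (p : List Char) :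
    (pats.foldl (fun d q => if !PySem.Dict.contains d q && PySem.Chars.isIn q line
                            then PySem.Dict.insert d q off else d) d).get? p =
      if p ∈ pats ∧ PySem.Dict.get? d p = none ∧ PySem.Chars.isIn p line then some off
      else PySem.Dict.get? d p := by
  induction pats generalizing d with
  | nil => simp
  | cons q ps ih =>
    rw [List.foldl_cons, ih]
    by_cases hpq : p = q
    · subst hpq
      by_cases h1 : PySem.Dict.get? d p = none
      · by_cases h2 : PySem.Chars.isIn p line
        · have hcont : PySem.Dict.contains d p = false := by
            rw [PySem.Dict.contains_eq_isSome_get?, h1]; rfl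
          simp [hcont, h2, PySem.Dict.get?_insert, h1]
        · have : (!PySem.Dict.contains d p && PySem.Chars.isIn p line) = false := by
            simp [h2]
          simp [this, h1, h2]
      · have hcont : PySem.Dict.contains d p = true := by
          rw [PySem.Dict.contains_eq_isSome_get?]
          cases hg : PySem.Dict.get? d p with
          | none => exact absurd hg h1
          | some v => rfl
        simp [hcont, h1]
    · by_cases hq : (!PySem.Dict.contains d q && PySem.Chars.isIn q line) = true
      · simp only [hq, if_true]
        rw [show ∀ v, PySem.Dict.get? (PySem.Dict.insert d q v) p = PySem.Dict.get? d p from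
          fun v => by rw [PySem.Dict.get?_insert]; simp [hpq]]
        simp [List.mem_cons, hpq]
      · simp only [hq, if_false]
        simp [List.mem_cons, hpq]

theorem pv_fold_get? (lines : List (List Char)) (d0 : PySem.Dict (List Char) Int)
    (b0 : Bool) (s0 : Option Int) (o0 : Int) (p : List Char) (hp : p ∈ pvPatternsB) :
    (lines.foldl pvStep (d0, b0, s0, o0)).1.get? p =
      match PySem.Dict.get? d0 p with
      | some v => some v
      | none => (lines.findIdx? (fun l => PySem.Chars.isIn p l)).map
          (fun i => o0 + pvLineStart lines i) := by
  induction lines generalizing d0 b0 s0 o0 with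
  | nil =>
    cases hd0 : PySem.Dict.get? d0 p <;> simp [hd0]
  | cons l rest ih =>
    rw [List.foldl_cons, pv_step_eta (d0, b0, s0, o0) l, ih _ _ _ _]
    rw [pv_step_d, pv_step_off]
    dsimp only
    rw [pv_inner_get? pvPatternsB d0 l o0 p]
    by_cases hd0 : PySem.Dict.get? d0 p = none
    · by_cases hc : PySem.Chars.isIn p l
      · simp [hp, hd0, hc, List.findIdx?_cons, pv_lineStart_zero]
      · have hcond : ¬(p ∈ pvPatternsB ∧ PySem.Dict.get? d0 p = none ∧ PySem.Chars.isIn p l = true) := by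
          simp [hc]
        rw [if_neg hcond, hd0, List.findIdx?_cons]
        simp only [hc, Bool.false_eq_true, if_false]
        cases hfi : rest.findIdx? (fun l => PySem.Chars.isIn p l) with
        | none => simp
        | some k =>
          simp only [Option.map_some, Option.map_map]
          congr 1
          simp [pv_lineStart_cons]
          ring
    · obtain ⟨v, hv⟩ := Option.ne_none_iff_exists'.mp hd0
      simp [hv]

theorem pv_fold_off (lines : List (List Char)) (st0 : PySem.Dict (List Char) Int × Bool × Option Int × Int) :
    (lines.foldl pvStep st0).2.2.2 = st0.2.2.2 + pvTotLen lines := by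
  induction lines generalizing st0 with
  | nil => simp [pvTotLen]
  | cons l rest ih =>
    rw [List.foldl_cons, ih, pv_step_off]
    simp [pvTotLen]
    ring

theorem pv_fold_seen (lines : List (List Char)) (st0 : PySem.Dict (List Char) Int × Bool × Option Int × Int) :
    (lines.foldl pvStep st0).2.1 = (st0.2.1 || lines.any pvIsDocA) := by
  induction lines generalizing st0 with
  | nil => simp
  | cons l rest ih =>
    rw [List.foldl_cons, ih, pv_step_seen]
    simp [Bool.or_assoc]

theorem pv_lastDoc?_none (lines : List (List Char)) (h : pvLastDoc? lines = none) :
    ∀ l ∈ lines, pvIsDocA l = false := by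
  induction lines with
  | nil => simp
  | cons l rest ih =>
    intro x hx
    cases hld : pvLastDoc? rest with
    | some j => simp [pvLastDoc?, hld] at h
    | none =>
      by_cases hdoc : pvIsDocA l
      · simp [pvLastDoc?, hld, hdoc] at h
      · rcases List.mem_cons.mp hx with rfl | hx'
        · simpa using hdoc
        · exact ih hld x hx'

theorem pv_lastDoc?_lt (lines : List (List Char)) (i : Nat) (h : pvLastDoc? lines = some i) :
    i < lines.length := by
  induction lines generalizing i with
  | nil => simp [pvLastDoc?] at h
  | cons l rest ih =>
    cases hld : pvLastDoc? rest with
    | some j =>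
      have : i = j + 1 := by simp [pvLastDoc?, hld] at h; omega
      subst this
      simpa using Nat.succ_lt_succ (ih j hld)
    | none =>
      by_cases hdoc : pvIsDocA l
      · have : i = 0 := by simp [pvLastDoc?, hld, hdoc] at h; omega
        subst this
        simp
      · simp [pvLastDoc?, hld, hdoc] at h

theorem pv_hh_eq_ph_of_not_doc (l : List Char) (hd : pvIsDocA l = false) :
    pvIsHH l = pvIsPH l := by
  by_cases hph : pvIsPH l
  · rw [hph, pvIsHH, pv_ph_implies_hh l hph]
  · have hph' : pvIsPH l = false := by simpa using hph
    rw [hph']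
    simp only [pvIsPH, Bool.or_eq_false_iff] at hph'
    simp only [pvIsDocA, hph'.1, hph'.2, Bool.not_false, Bool.and_true] at hd
    simpa [pvIsHH] using hd

theorem pv_findIdx?_congr {α : Type} (p q : α → Bool) (xs : List α)
    (h : ∀ x ∈ xs, p x = q x) : xs.findIdx? p = xs.findIdx? q := by
  induction xs with
  | nil => rfl
  | cons x rest ih =>
    rw [List.findIdx?_cons, List.findIdx?_cons, h x (List.mem_cons_self ..),
      ih (fun y hy => h y (List.mem_cons_of_mem _ hy))]

theorem pv_lineStart_full (lines : List (List Char)) :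
    pvLineStart lines lines.length = pvTotLen lines := by
  simp [pvLineStart, pvTotLen]

theorem pv_fold_sec (lines : List (List Char)) (d0 : PySem.Dict (List Char) Int)
    (b0 : Bool) (s0 : Option Int) (o0 : Int) :
    (lines.foldl pvStep (d0, b0, s0, o0)).2.2.1 =
      match pvLastDoc? lines with
      | some i => ((lines.drop (i + 1)).findIdx? pvIsPH).map
          (fun k => o0 + pvLineStart lines (i + 1 + k))
      | none =>
          if s0.isSome then s0
          else if b0 then (lines.findIdx? pvIsPH).map (fun k => o0 + pvLineStart lines k)
          else none := by
  induction lines generalizing d0 b0 s0 o0 with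
  | nil => cases s0 <;> cases b0 <;> simp [pvLastDoc?]
  | cons l rest ih =>
    rw [List.foldl_cons, pv_step_eta (d0, b0, s0, o0) l, ih _ _ _ _, pv_step_seen, pv_step_sec,
      pv_step_off]
    dsimp only
    cases hld : pvLastDoc? rest with
    | some i =>
      have hcons : pvLastDoc? (l :: rest) = some (i + 1) := by simp [pvLastDoc?, hld]
      rw [hcons]
      cases hfi : (rest.drop (i + 1)).findIdx? pvIsPH with
      | none => simp [List.drop_succ_cons, hfi]
      | some k =>
        simp only [List.drop_succ_cons, hfi, Option.map_some]
        have : i + 1 + 1 + k = (i + 1 + k) + 1 := by omega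
        rw [this, pv_lineStart_cons]
        congr 1
        ring
    | none =>
      by_cases hdoc : pvIsDocA l
      · have hcons : pvLastDoc? (l :: rest) = some 0 := by simp [pvLastDoc?, hld, hdoc]
        rw [hcons]
        simp only [hdoc, if_true, Option.isSome_none, Bool.false_eq_true, if_false,
          Bool.or_true, if_true, List.drop_succ_cons, List.drop_zero]
        cases hfi : rest.findIdx? pvIsPH with
        | none => simp [hfi]
        | some k =>
          simp only [hfi, Option.map_some]
          have : 0 + 1 + k = k + 1 := by omega
          rw [this, pv_lineStart_cons]
          congr 1
          ring
      · have hcons : pvLastDoc? (l :: rest) = none := by simp [pvLastDoc?, hld, hdoc]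
        rw [hcons]
        simp only [hdoc, Bool.false_eq_true, if_false, Bool.or_false]
        by_cases hph : pvIsPH l
        · cases hs0 : s0 with
          | some v => simp [hph]
          | none =>
            cases hb0 : b0 with
            | false => simp [hph]
            | true =>
              simp only [hph, if_true, Bool.true_and, Option.isNone_none, if_true,
                Option.isSome_some, List.findIdx?_cons, pv_lineStart_zero]
              simp [pv_lineStart_zero]
        · simp only [hph, Bool.false_eq_true, if_false]
          cases hs0 : s0 with
          | some v => simp
          | none =>
            cases hb0 : b0 with
            | false => simp
            | true =>
              simp only [Option.isSome_none, Bool.false_eq_true, if_false, if_true,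
                List.findIdx?_cons, hph]
              cases hfi : rest.findIdx? pvIsPH with
              | none => simp [hfi]
              | some k =>
                simp only [hfi, Option.map_some, Option.map_map, Function.comp,
                  pv_lineStart_cons]
                ring_nf

theorem pv_lastDoc_eq (lines : List (List Char)) (s : Nat) (acc : Int) :
    pvLastDoc (PySem.List.enumerate lines (s : Int)) acc =
      match pvLastDoc? lines with
      | some i => ((s + i : Nat) : Int)
      | none => acc := by
  induction lines generalizing s acc with
  | nil => simp [pvLastDoc, pvLastDoc?, PySem.List.enumerate_nil]
  | cons l rest ih =>
    rw [PySem.List.enumerate_cons, pvLastDoc]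
    have hrw : ((s : Int) + 1) = ((s + 1 : Nat) : Int) := by push_cast; ring
    rw [hrw, ih (s + 1) _]
    cases hld : pvLastDoc? rest with
    | some i =>
      have hcons : pvLastDoc? (l :: rest) = some (i + 1) := by simp [pvLastDoc?, hld]
      rw [hcons]
      simp only [Nat.add_assoc, Nat.add_comm 1 i]
    | none =>
      by_cases hdoc : pvIsDocA l
      · have hcons : pvLastDoc? (l :: rest) = some 0 := by simp [pvLastDoc?, hld, hdoc]
        rw [hcons]
        simp [hdoc]
      · have hcons : pvLastDoc? (l :: rest) = none := by simp [pvLastDoc?, hld, hdoc]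
        rw [hcons]
        simp [hdoc]

theorem pv_secLoop_eq (lines : List (List Char)) (i : Nat) (h : i ≤ lines.length) :
    pvSecLoop lines (PySem.List.pyRange (i : Int) lines.length) =
      match (lines.drop i).findIdx? pvIsHH with
      | some k => ((i + k : Nat) : Int)
      | none => (lines.length : Int) := by
  generalize hn : lines.length - i = n
  induction n generalizing i with
  | zero =>
    have hi : i = lines.length := by omega
    subst hi
    rw [List.drop_length]
    have hr : PySem.List.pyRange (lines.length : Int) (lines.length : Int) = [] := by
      simp [pysem]
    rw [hr]
    simp [pvSecLoop]
  | succ n ihn =>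
    have hi : i < lines.length := by omega
    have hcast : ((i : Int) < (lines.length : Int)) := by exact_mod_cast hi
    rw [PySem.List.pyRange_one_cons hcast, pvSecLoop,
      List.drop_eq_getElem_cons hi, List.findIdx?_cons]
    rw [PySem.List.pyGetD_natCast, List.getD_eq_getElem lines [] hi]
    by_cases hsw : PySem.Chars.startswith lines[i] "## ".toList
    · have hsw' : PySem.Chars.startswith lines[i] ['#', '#', ' '] = true := by simpa using hsw
      simp [pvIsHH, hsw']
    · have hsw' : PySem.Chars.startswith lines[i] ['#', '#', ' '] = false := by simpa using hsw
      have hrw : ((i : Int) + 1) = ((i + 1 : Nat) : Int) := by push_cast; ring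
      rw [hrw, ihn (i + 1) (by omega) (by omega)]
      simp only [pvIsHH]
      cases hfi : (lines.drop (i + 1)).findIdx? pvIsHH with
      | none => simp [hsw']
      | some k =>
        have harith : i + 1 + k = i + (k + 1) := by omega
        simp [hsw', harith]

theorem pv_no_doc_after (lines : List (List Char)) (i : Nat) (h : pvLastDoc? lines = some i) :
    ∀ l ∈ lines.drop (i + 1), pvIsDocA l = false := by
  induction lines generalizing i with
  | nil => simp [pvLastDoc?] at h
  | cons l rest ih =>
    cases hld : pvLastDoc? rest with
    | some j =>
      have : i = j + 1 := by simp [pvLastDoc?, hld] at h; omega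
      subst this
      rw [List.drop_succ_cons]
      exact ih j hld
    | none =>
      by_cases hdoc : pvIsDocA l
      · have : i = 0 := by simp [pvLastDoc?, hld, hdoc] at h; omega
        subst this
        rw [List.drop_succ_cons, List.drop_zero]
        exact pv_lastDoc?_none rest hld
      · simp [pvLastDoc?, hld, hdoc] at h

theorem pv_select_eq (lines : List (List Char)) (d : PySem.Dict (List Char) Int)
    (pats : List (List Char))
    (hd : ∀ p ∈ pats, d.get? p =
      (lines.findIdx? (fun l => PySem.Chars.isIn p l)).map (fun i => pvLineStart lines i)) :
    pvSelect d pats = pvPatAns lines pats := by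
  induction pats with
  | nil => rfl
  | cons p ps ih =>
    rw [pvSelect, pvPatAns, hd p (List.mem_cons_self ..)]
    cases hfi : lines.findIdx? (fun l => PySem.Chars.isIn p l) with
    | none => exact ih (fun q hq => hd q (List.mem_cons_of_mem _ hq))
    | some k => simp

theorem pv_lastDoc?_any (lines : List (List Char)) (i : Nat) (h : pvLastDoc? lines = some i) :
    lines.any pvIsDocA = true := by
  induction lines generalizing i with
  | nil => simp [pvLastDoc?] at h
  | cons l rest ih =>
    cases hld : pvLastDoc? rest with
    | some j => simp [List.any_cons, ih j hld]
    | none =>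
      by_cases hdoc : pvIsDocA l
      · simp [List.any_cons, hdoc]
      · simp [pvLastDoc?, hld, hdoc] at h

theorem pv_core (lines : List (List Char)) :
    (match pvTryPatterns lines pvPatterns with
     | some v => v
     | none =>
         let last := pvLastDoc (PySem.List.enumerate lines 0) (-1)
         if 0 ≤ last then
           pvCharPos lines (pvSecLoop lines (PySem.List.pyRange (last + 1) lines.length))
         else 0) =
    (let st := lines.foldl pvStep (PySem.Dict.empty, false, none, 0)
     match pvSelect st.1 pvPatternsB with
     | some v => v
     | none => if st.2.1 then st.2.2.1.getD st.2.2.2 else 0) := by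
  have hsel : pvSelect (lines.foldl pvStep (PySem.Dict.empty, false, none, 0)).1 pvPatternsB
      = pvPatAns lines pvPatternsB := by
    apply pv_select_eq
    intro p hp
    rw [pv_fold_get? lines PySem.Dict.empty false none 0 p hp]
    simp [PySem.Dict.get?_empty]
  rw [pv_try_eq]
  dsimp only
  rw [hsel]
  have hBP : pvPatternsB = pvPatterns := rfl
  rw [hBP]
  cases hpa : pvPatAns lines pvPatterns with
  | some v => rfl
  | none =>
    have hA := pv_lastDoc_eq lines 0 (-1)
    simp only [Nat.cast_zero, Nat.zero_add] at hA
    rw [hA, pv_fold_seen, pv_fold_sec lines PySem.Dict.empty false none 0, pv_fold_off]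
    cases hld : pvLastDoc? lines with
    | none =>
      have hany : lines.any pvIsDocA = false := by
        rw [List.any_eq_false]
        intro x hx
        simp [pv_lastDoc?_none lines hld x hx]
      rw [hany]
      norm_num
    | some i =>
      have hi : i < lines.length := pv_lastDoc?_lt lines i hld
      have hany : lines.any pvIsDocA = true := pv_lastDoc?_any lines i hld
      rw [hany]
      rw [if_pos (Int.natCast_nonneg i)]
      have hcast : ((i : Int) + 1) = ((i + 1 : Nat) : Int) := by push_cast; ring
      rw [hcast, pv_secLoop_eq lines (i + 1) hi]
      rw [pv_findIdx?_congr pvIsHH pvIsPH (lines.drop (i + 1))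
        (fun x hx => pv_hh_eq_ph_of_not_doc x (pv_no_doc_after lines i hld x hx))]
      cases hfi : (lines.drop (i + 1)).findIdx? pvIsPH with
      | none =>
        rw [pv_charPos_eq lines lines.length (le_refl _)]
        simp [pv_lineStart_full, hfi]
      | some k =>
        have hk : k < (lines.drop (i + 1)).length := by
          obtain ⟨hl, -, -⟩ := List.findIdx?_eq_some_iff_getElem.mp hfi
          exact hl
        have hle : i + 1 + k ≤ lines.length := by
          rw [List.length_drop] at hk
          omega
        rw [pv_charPos_eq lines (i + 1 + k) hle]
        simp [hfi]

-- ===== VERDICT (by name: the statement is the Claim_ definition above) =====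
theorem find_papers_insert_position_py_spec : Claim_equal_find_papers_insert_position_py := by
  intro content _
  unfold Spec_find_papers_insert_position_py find_papers_insert_position_py
    find_papers_insert_position_py_alt
  exact pv_core (PySem.Chars.splitOn content.toList "\n".toList)
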